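-- pv_equiv track=rewrite | github.com/Giosirbiladze/GOA-homework | day 40/classwork/classwork.py | flick_switch
-- ===== SOURCE A (Python) =====
-- def flick_switch(lst):
--     result = []
--     flip = True
--
--     for item in lst:
--         if item == 'flick':
--             flip = not flip
--         result.append(flip)
--
--     return result
-- ===== SOURCE B (Python) =====
-- def flick_switch(lst):
--     n = len(lst)
--     cuts = [i for i, item in enumerate(lst) if item == 'flick']
--     out = []
--     val = True
--     prev = 0
--     for c in cuts:
--         out.extend([val] * (c - prev))
--         val = not val
--         prev = c
--     out.extend([val] * (n - prev))
--     return out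
-- ===== Notes on version B (the rewrite author's own statement) =====
-- stated objective: alternative
-- what changed: Instead of toggling a flag per element, B first collects the indices of 'flick' occurrences, then emits the output as constant runs between consecutive cut positions (run-length construction), alternating the run value at each cut.
import Mathlib
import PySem

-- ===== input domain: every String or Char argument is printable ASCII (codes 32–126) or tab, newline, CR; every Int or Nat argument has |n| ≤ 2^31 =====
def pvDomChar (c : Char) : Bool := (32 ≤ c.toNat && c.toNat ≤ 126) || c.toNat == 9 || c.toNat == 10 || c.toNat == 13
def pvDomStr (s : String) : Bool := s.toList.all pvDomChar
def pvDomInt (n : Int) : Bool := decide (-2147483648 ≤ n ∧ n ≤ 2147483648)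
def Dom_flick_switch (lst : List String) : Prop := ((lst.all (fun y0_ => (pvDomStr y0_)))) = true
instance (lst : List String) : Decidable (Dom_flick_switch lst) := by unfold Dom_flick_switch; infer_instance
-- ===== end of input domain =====

-- B replaces the per-element toggle loop by a two-stage run-length construction
-- (collect 'flick' indices, then emit constant runs between them); same cost, alternative algorithm.

-- ===== PORT A =====
def flick_switch (lst : List String) : List Bool :=
  (lst.foldl (fun (st : List Bool × Bool) item =>
      let flip := if item == "flick" then !st.2 else st.2
      (st.1 ++ [flip], flip)) ([], true)).1

-- ===== PORT B =====
def flick_switch_alt (lst : List String) : List Bool :=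
  let n : Int := lst.length
  let cuts := ((PySem.List.enumerate lst).filter (fun p => p.2 == "flick")).map (fun p => p.1)
  let st := cuts.foldl (fun (st : List Bool × Bool × Int) c =>
      (st.1 ++ List.replicate (c - st.2.2).toNat st.2.1, !st.2.1, c)) ([], true, 0)
  st.1 ++ List.replicate (n - st.2.2).toNat st.2.1

-- ===== PRECONDITION & SPEC =====
def Spec_flick_switch (lst : List String) (out : List Bool) : Prop := out = flick_switch_alt lst
instance (lst : List String) (out : List Bool) : Decidable (Spec_flick_switch lst out) := by unfold Spec_flick_switch; infer_instance

-- ===== CLAIM (what is proved, stated in full; the proofs are below) =====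
def Claim_equal_flick_switch : Prop := ∀ (lst : List String), Dom_flick_switch lst → Spec_flick_switch lst (flick_switch lst)

-- ===== LEMMAS AND PROOFS =====

-- reference recursion: the stream of states A appends
def pvBuild (flip : Bool) : List String → List Bool
  | [] => []
  | h :: t => let f := if h == "flick" then !flip else flip
              f :: pvBuild f t

theorem pvA_loop (l : List String) (res : List Bool) (flip : Bool) :
    (l.foldl (fun (st : List Bool × Bool) item =>
      let f := if item == "flick" then !st.2 else st.2
      (st.1 ++ [f], f)) (res, flip)).1 = res ++ pvBuild flip l := by
  induction l generalizing res flip with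
  | nil => simp [pvBuild]
  | cons h t ih =>
    simp only [List.foldl_cons]
    rw [ih]
    simp [pvBuild]

theorem pvB_loop (l : List String) (k : Int) (acc : List Bool) (val : Bool) (prev : Int)
    (hp : prev ≤ k) :
    (let st := (((PySem.List.enumerate l k).filter (fun p => p.2 == "flick")).map (fun p => p.1)).foldl
        (fun (st : List Bool × Bool × Int) c =>
          (st.1 ++ List.replicate (c - st.2.2).toNat st.2.1, !st.2.1, c)) (acc, val, prev)
     st.1 ++ List.replicate ((k + l.length) - st.2.2).toNat st.2.1)
    = acc ++ List.replicate (k - prev).toNat val ++ pvBuild val l := by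
  induction l generalizing k acc val prev with
  | nil => simp [PySem.List.enumerate, pvBuild]
  | cons h t ih =>
    simp only [PySem.List.enumerate_cons, List.filter_cons, List.length_cons]
    by_cases hh : h == "flick"
    · simp only [hh, if_pos, List.map_cons, List.foldl_cons]
      have := ih (k + 1) (acc ++ List.replicate (k - prev).toNat val) (!val) k (by omega)
      simp only at this
      push_cast
      rw [show (k : Int) + (↑t.length + 1) = (k+1) + t.length by ring, this]
      simp [pvBuild, hh]
    · simp only [hh]
      simp only [Bool.false_eq_true, if_false] -- filter drops h
      have := ih (k + 1) acc val prev (by omega)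
      simp only at this
      push_cast
      rw [show (k : Int) + (↑t.length + 1) = (k+1) + t.length by ring, this]
      have h1 : ((k : Int) + 1 - prev).toNat = (k - prev).toNat + 1 := by omega
      simp [pvBuild, hh, h1, List.replicate_succ', List.append_assoc]

-- ===== VERDICT (by name: the statement is the Claim_ definition above) =====
theorem flick_switch_spec : Claim_equal_flick_switch := by
  intro lst _
  unfold Spec_flick_switch flick_switch flick_switch_alt
  have hB := pvB_loop lst 0 [] true 0 (le_refl 0)
  simp only [zero_add] at hB
  simp only [hB]
  simpa using pvA_loop lst [] true
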